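-- pv_equiv track=rewrite | github.com/sonpham-org/arc-agi-3 | server.py | compute_color_histogram
-- ===== SOURCE A (Python) =====
-- COLOR_NAMES = {
--     0: "White", 1: "LightGray", 2: "Gray", 3: "DarkGray",
--     4: "VeryDarkGray", 5: "Black", 6: "Magenta", 7: "LightMagenta",
--     8: "Red", 9: "Blue", 10: "LightBlue", 11: "Yellow",
--     12: "Orange", 13: "Maroon", 14: "Green", 15: "Purple",
-- }
--
-- def compute_color_histogram(grid: list) -> str:
--     if not grid:
--         return ""
--     counts: dict[int, int] = {}
--     for row in grid:
--         for v in row: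
--             counts[v] = counts.get(v, 0) + 1
--     return "\n".join(
--         f"  {v} ({COLOR_NAMES.get(v, '?')}): {cnt} cells"
--         for v, cnt in sorted(counts.items())
--     )
-- ===== SOURCE B (Python) =====
-- COLOR_NAMES = {
--     0: "White", 1: "LightGray", 2: "Gray", 3: "DarkGray",
--     4: "VeryDarkGray", 5: "Black", 6: "Magenta", 7: "LightMagenta",
--     8: "Red", 9: "Blue", 10: "LightBlue", 11: "Yellow",
--     12: "Orange", 13: "Maroon", 14: "Green", 15: "Purple",
-- }
--
-- def compute_color_histogram(grid: list) -> str: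
--     if not grid:
--         return ""
--     cells = sorted(v for row in grid for v in row)
--     n = len(cells)
--     lines = []
--     i = 0
--     while i < n:
--         v = cells[i]
--         k = 0  # length of the run of v following position i
--         while i + 1 + k < n and cells[i + 1 + k] == v:
--             k += 1
--         lines.append(f"  {v} ({COLOR_NAMES.get(v, '?')}): {1 + k} cells")
--         i = i + 1 + k
--     return "\n".join(lines)
-- ===== Notes on version B (the rewrite author's own statement) =====
-- stated objective: alternative
-- what changed: Replaces the dict-counting pass plus sorted(items) with flatten-sort-then-run-length-grouping over the sorted cell list; no dictionary of counts is maintained.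
import Mathlib
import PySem

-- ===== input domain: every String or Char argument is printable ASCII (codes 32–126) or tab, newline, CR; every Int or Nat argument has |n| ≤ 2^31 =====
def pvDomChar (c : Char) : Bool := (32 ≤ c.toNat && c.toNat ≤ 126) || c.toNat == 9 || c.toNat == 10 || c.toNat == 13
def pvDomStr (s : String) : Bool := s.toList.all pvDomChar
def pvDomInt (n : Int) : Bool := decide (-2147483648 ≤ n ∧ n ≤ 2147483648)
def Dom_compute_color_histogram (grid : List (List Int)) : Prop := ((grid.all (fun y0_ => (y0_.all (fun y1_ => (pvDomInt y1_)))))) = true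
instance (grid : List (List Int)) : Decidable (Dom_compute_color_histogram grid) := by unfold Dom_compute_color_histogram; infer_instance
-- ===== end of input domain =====

-- B replaces the dict-counting pass with flatten-sort-then-run-length grouping; same output, alternative algorithm.

-- shared module constant COLOR_NAMES and the f-string line format (used verbatim by both programs)
def pvColorNames : PySem.Dict Int String := PySem.Dict.ofList
  [(0, "White"), (1, "LightGray"), (2, "Gray"), (3, "DarkGray"),
   (4, "VeryDarkGray"), (5, "Black"), (6, "Magenta"), (7, "LightMagenta"),
   (8, "Red"), (9, "Blue"), (10, "LightBlue"), (11, "Yellow"),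
   (12, "Orange"), (13, "Maroon"), (14, "Green"), (15, "Purple")]

-- f"  {v} ({COLOR_NAMES.get(v, '?')}): {cnt} cells"
def pvLine (v cnt : Int) : String :=
  "  " ++ PySem.Int.toStr v ++ " (" ++ pvColorNames.getD v "?" ++ "): " ++ PySem.Int.toStr cnt ++ " cells"

-- ===== PORT A =====
def compute_color_histogram (grid : List (List Int)) : String :=
  if grid = [] then ""
  else
    let counts : PySem.Dict Int Int :=
      grid.foldl (fun counts row =>
        row.foldl (fun counts v => counts.insert v (counts.getD v 0 + 1)) counts) PySem.Dict.empty
    -- sorted(counts.items()): tuple comparison = sorted2 with the two components as keys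
    PySem.Str.join "\n"
      ((PySem.List.sorted2 counts.items (fun p => p.1) (fun p => p.2)).map (fun p => pvLine p.1 p.2))

-- ===== PORT B =====
-- the 'while cells:' run-length loop of Source B: peel the leading run of the head value
def pvRle : List Int → List (Int × Int)
  | [] => []
  | v :: rest =>
      (v, 1 + ((rest.takeWhile (fun x => x == v)).length : Int)) ::
        pvRle (rest.dropWhile (fun x => x == v))
termination_by t => t.length
decreasing_by
  simp only [List.length_cons]
  exact Nat.lt_succ_of_le (List.length_dropWhile_le _ _)

def compute_color_histogram_alt (grid : List (List Int)) : String :=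
  if grid = [] then ""
  else
    let cells := PySem.List.sorted (grid.flatMap (fun row => row)) (fun x => x)
    PySem.Str.join "\n" ((pvRle cells).map (fun p => pvLine p.1 p.2))

-- ===== PRECONDITION & SPEC =====
def Spec_compute_color_histogram (grid : List (List Int)) (out : String) : Prop := out = compute_color_histogram_alt grid
instance (grid : List (List Int)) (out : String) : Decidable (Spec_compute_color_histogram grid out) := by unfold Spec_compute_color_histogram; infer_instance

-- ===== CLAIM (what is proved, stated in full; the proofs are below) =====
def Claim_equal_compute_color_histogram : Prop := ∀ (grid : List (List Int)), Dom_compute_color_histogram grid → Spec_compute_color_histogram grid (compute_color_histogram grid)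

-- ===== LEMMAS AND PROOFS =====

-- the nested counting loop over rows is the loop over the flattened list
lemma pv_foldl_nested {α β : Type} (grid : List (List α)) (f : β → α → β) (init : β) :
    grid.foldl (fun acc row => row.foldl f acc) init = (grid.flatMap (fun r => r)).foldl f init := by
  induction grid generalizing init with
  | nil => rfl
  | cons r t ih => simp [List.flatMap_cons, List.foldl_append, ih]

lemma pv_insertBy_congr {α : Type} (b1 b2 : α → α → Bool) (x : α) (ys : List α)
    (h : ∀ y ∈ ys, b1 x y = b2 x y) :
    PySem.List.insertBy b1 x ys = PySem.List.insertBy b2 x ys := by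
  induction ys with
  | nil => rfl
  | cons y ys ih =>
      simp only [PySem.List.insertBy]
      rw [h y (by simp)]
      split
      · rfl
      · rw [ih (fun z hz => h z (by simp [hz]))]

lemma pv_foldl_insertBy_congr {α : Type} (b1 b2 : α → α → Bool) (xs acc : List α)
    (h : ∀ a, (a ∈ xs ∨ a ∈ acc) → ∀ b, (b ∈ xs ∨ b ∈ acc) → b1 a b = b2 a b) :
    xs.foldl (fun acc x => PySem.List.insertBy b1 x acc) acc
      = xs.foldl (fun acc x => PySem.List.insertBy b2 x acc) acc := by
  induction xs generalizing acc with
  | nil => rfl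
  | cons x t ih =>
      simp only [List.foldl_cons]
      rw [pv_insertBy_congr b1 b2 x acc (fun y hy => h x (by simp) y (Or.inr hy))]
      apply ih
      have step : ∀ a, (a ∈ t ∨ a ∈ PySem.List.insertBy b2 x acc) → (a ∈ x :: t ∨ a ∈ acc) := by
        intro a ha
        rcases ha with ha | ha
        · exact Or.inl (by simp [ha])
        · exact ((PySem.List.insertBy_mem_iff _ _ _ _).1 ha).elim
            (fun e => Or.inl (by simp [e])) Or.inr
      intro a ha b hb
      exact h a (step a ha) b (step b hb)

-- on a list of pairs whose first components determine the pair, Python's tuple sort is the sort by fst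
lemma pv_sorted2_eq_sorted_fst (xs : List (Int × Int))
    (h : ∀ a ∈ xs, ∀ b ∈ xs, a.1 = b.1 → a = b) :
    PySem.List.sorted2 xs (fun p => p.1) (fun p => p.2) = PySem.List.sorted xs (fun p => p.1) := by
  rw [PySem.List.sorted_eq_foldl_insertBy]
  simp only [PySem.List.sorted2]
  apply pv_foldl_insertBy_congr
  intro a ha b hb
  simp only [List.mem_nil_iff, or_false] at ha hb
  by_cases h1 : a.1 < b.1
  · simp [h1]
  · by_cases h2 : b.1 < a.1
    · simp [h1, h2]
    · have : a = b := h a ha b hb (by omega)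
      subst this
      simp

lemma pv_dropWhile_lt (v : Int) (rest : List Int) (hle : ∀ x ∈ rest, v ≤ x)
    (hp : rest.Pairwise (· ≤ ·)) :
    ∀ x ∈ rest.dropWhile (fun x => x == v), v < x := by
  induction rest with
  | nil => simp
  | cons a l ih =>
      simp only [List.dropWhile_cons]
      split
      · exact ih (fun x hx => hle x (by simp [hx])) (List.pairwise_cons.1 hp).2
      · rename_i hne
        have hva : v < a := by
          have := hle a (by simp)
          have : a ≠ v := by simpa using hne
          omega
        intro x hx
        rcases List.mem_cons.1 hx with rfl | hx
        · exact hva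
        · exact lt_of_lt_of_le hva ((List.pairwise_cons.1 hp).1 x hx)

lemma pv_count_facts (v : Int) (rest : List Int) (ht : (v :: rest).Pairwise (· ≤ ·)) :
    ((v :: rest).count v = (rest.takeWhile (fun x => x == v)).length + 1) ∧
    (∀ x ∈ rest.dropWhile (fun x => x == v),
        (v :: rest).count x = (rest.dropWhile (fun x => x == v)).count x) := by
  obtain ⟨hle, hp⟩ := List.pairwise_cons.1 ht
  have hlt := pv_dropWhile_lt v rest hle hp
  have hwv : ∀ x ∈ rest.takeWhile (fun x => x == v), x = v := by
    intro x hx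
    simpa using List.mem_takeWhile_imp hx
  have hsplit : rest.takeWhile (fun x => x == v) ++ rest.dropWhile (fun x => x == v) = rest :=
    List.takeWhile_append_dropWhile
  have hcnt : ∀ y : Int, rest.count y
      = (rest.takeWhile (fun x => x == v)).count y + (rest.dropWhile (fun x => x == v)).count y := by
    intro y
    conv_lhs => rw [← hsplit]
    rw [List.count_append]
  constructor
  · rw [List.count_cons_self, hcnt]
    have h1 : (rest.takeWhile (fun x => x == v)).count v
        = (rest.takeWhile (fun x => x == v)).length :=
      List.count_eq_length.2 (fun b hb => (hwv b hb).symm)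
    have h2 : (rest.dropWhile (fun x => x == v)).count v = 0 :=
      List.count_eq_zero.2 (fun hv => absurd (hlt v hv) (by omega))
    omega
  · intro x hx
    have hvx : v < x := hlt x hx
    rw [List.count_cons_of_ne (by omega), hcnt]
    have h1 : (rest.takeWhile (fun x => x == v)).count x = 0 :=
      List.count_eq_zero.2 (fun hv => absurd (hwv x hv) (by omega))
    omega

lemma pv_mem_pvRle (t : List Int) (ht : t.Pairwise (· ≤ ·)) (p : Int × Int) :
    p ∈ pvRle t ↔ (p.1 ∈ t ∧ p.2 = (t.count p.1 : Int)) := by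
  induction t using pvRle.induct with
  | case1 => simp [pvRle]
  | case2 v rest ih =>
      obtain ⟨hle, hp⟩ := List.pairwise_cons.1 ht
      have hlt := pv_dropWhile_lt v rest hle hp
      have hdp : (rest.dropWhile (fun x => x == v)).Pairwise (· ≤ ·) :=
        hp.sublist (List.dropWhile_sublist _)
      obtain ⟨hcv, hco⟩ := pv_count_facts v rest ht
      have hwv : ∀ x ∈ rest.takeWhile (fun x => x == v), x = v := by
        intro x hx
        simpa using List.mem_takeWhile_imp hx
      have hsplit : rest.takeWhile (fun x => x == v) ++ rest.dropWhile (fun x => x == v) = rest :=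
        List.takeWhile_append_dropWhile
      rw [pvRle]
      have hhead : ∀ he : p.1 = v, p.2 = ((v :: rest).count p.1 : Int) →
          p = (v, 1 + ((rest.takeWhile (fun x => x == v)).length : Int)) := by
        intro he h2
        refine Prod.ext_iff.2 ⟨he, ?_⟩
        rw [h2, he, hcv]
        push_cast
        ring
      constructor
      · intro hmem
        rcases List.mem_cons.1 hmem with rfl | hmem
        · refine ⟨by simp, ?_⟩
          simp only [hcv]
          push_cast
          ring
        · obtain ⟨h1, h2⟩ := (ih hdp).1 hmem
          refine ⟨?_, by rw [hco p.1 h1]; exact h2⟩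
          have : p.1 ∈ rest := by rw [← hsplit]; exact List.mem_append_right _ h1
          exact List.mem_cons.2 (Or.inr this)
      · rintro ⟨h1, h2⟩
        rcases List.mem_cons.1 h1 with he | h1
        · exact List.mem_cons.2 (Or.inl (hhead he h2))
        · have h1' := h1
          rw [← hsplit, List.mem_append] at h1'
          rcases h1' with hw | hd
          · exact List.mem_cons.2 (Or.inl (hhead (hwv p.1 hw) h2))
          · exact List.mem_cons.2 (Or.inr ((ih hdp).2 ⟨hd, by rw [h2, hco p.1 hd]⟩))

lemma pv_pairwise_pvRle (t : List Int) (ht : t.Pairwise (· ≤ ·)) :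
    (pvRle t).Pairwise (fun a b => a.1 < b.1) := by
  induction t using pvRle.induct with
  | case1 => simp [pvRle]
  | case2 v rest ih =>
      obtain ⟨hle, hp⟩ := List.pairwise_cons.1 ht
      have hlt := pv_dropWhile_lt v rest hle hp
      have hdp : (rest.dropWhile (fun x => x == v)).Pairwise (· ≤ ·) :=
        hp.sublist (List.dropWhile_sublist _)
      rw [pvRle]
      refine List.pairwise_cons.2 ⟨?_, ih hdp⟩
      intro q hq
      exact hlt q.1 ((pv_mem_pvRle _ hdp q).1 hq).1

-- the sorted items of the counter are exactly the run-length encoding of the sorted flat list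
lemma pv_key (flat : List Int) :
    PySem.List.sorted2 (PySem.Dict.counter flat).items (fun p => p.1) (fun p => p.2)
      = pvRle (PySem.List.sorted flat (fun x => x)) := by
  have hs : (PySem.List.sorted flat (fun x => x)).Pairwise (· ≤ ·) :=
    PySem.List.sorted_pairwise flat (fun x => x)
  have hps : (PySem.List.sorted flat (fun x => x)).Perm flat :=
    PySem.List.sorted_perm flat (fun x => x) false
  have hitems : (PySem.Dict.counter flat).items
      = List.map (fun k => (k, (flat.count k : Int))) (PySem.Set.ofList flat) :=
    PySem.Dict.items_counter flat
  have hinj : Function.Injective (fun k : Int => (k, (flat.count k : Int))) := by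
    intro a b h
    exact congrArg Prod.fst h
  have hmem_items : ∀ p : Int × Int,
      p ∈ (PySem.Dict.counter flat).items ↔ (p.1 ∈ flat ∧ p.2 = (flat.count p.1 : Int)) := by
    intro p
    rw [hitems, List.mem_map]
    constructor
    · rintro ⟨k, hk, rfl⟩
      exact ⟨(PySem.Set.mem_ofList flat k).1 hk, rfl⟩
    · rintro ⟨h1, h2⟩
      exact ⟨p.1, (PySem.Set.mem_ofList flat p.1).2 h1, (Prod.ext_iff.2 ⟨rfl, h2.symm⟩)⟩
  have hpair : (pvRle (PySem.List.sorted flat (fun x => x))).Pairwise (fun a b => a.1 < b.1) :=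
    pv_pairwise_pvRle _ hs
  have hfst : ∀ a ∈ (PySem.Dict.counter flat).items, ∀ b ∈ (PySem.Dict.counter flat).items,
      a.1 = b.1 → a = b := by
    intro a ha b hb he
    obtain ⟨h1a, h2a⟩ := (hmem_items a).1 ha
    obtain ⟨h1b, h2b⟩ := (hmem_items b).1 hb
    refine Prod.ext_iff.2 ⟨he, ?_⟩
    rw [h2a, h2b, he]
  rw [pv_sorted2_eq_sorted_fst _ hfst]
  apply PySem.List.sorted_eq_of_perm_of_pairwise_lt
  · rw [List.perm_ext_iff_of_nodup]
    · intro p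
      rw [pv_mem_pvRle _ hs p, hmem_items p]
      rw [List.Perm.mem_iff hps, List.Perm.count_eq hps]
    · exact hpair.imp (fun {a b} h he => by rw [he] at h; omega)
    · rw [hitems]
      exact (PySem.Set.nodup_ofList flat).map hinj
  · exact hpair

-- ===== VERDICT (by name: the statement is the Claim_ definition above) =====
theorem compute_color_histogram_spec : Claim_equal_compute_color_histogram := by
  intro grid _
  unfold Spec_compute_color_histogram compute_color_histogram compute_color_histogram_alt
  split
  · rfl
  · simp only []
    rw [pv_foldl_nested, PySem.Dict.foldl_insert_getD_add_one_eq_counter, pv_key]
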